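-- pv_equiv track=rewrite | github.com/lucaromagnoli/my_leetcode | solutions/max_sum_path.py | find_max_sum_path
-- ===== SOURCE A (Python) =====
-- def find_max_sum_path(arr1, arr2):
--     common_numbers = set(arr1).intersection(set(arr2))
--     paths = []
--     for num in common_numbers:
--         idx1 = arr1.index(num)
--         idx2 = arr2.index(num)
--         paths.append(
--             max(sum(arr1[:idx1] + arr2[idx2:]), sum(arr2[:idx2] + arr1[idx1:]))
--         )
--     return max(paths)
-- ===== SOURCE B (Python) =====
-- def find_max_sum_path(arr1, arr2):
--     def first_prefix(arr):
--         # dict: value -> prefix sum before its FIRST occurrence; also return the total sum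
--         d = {}
--         s = 0
--         for x in arr:
--             if x not in d:
--                 d[x] = s
--             s += x
--         return d, s
--
--     p1, t1 = first_prefix(arr1)
--     p2, t2 = first_prefix(arr2)
--     best = None
--     for x, s1 in p1.items():
--         if x in p2:
--             s2 = p2[x]
--             v = max(s1 + (t2 - s2), s2 + (t1 - s1))
--             if best is None or v > best:
--                 best = v
--     return best
-- ===== Notes on version B (the rewrite author's own statement) =====
-- stated objective: faster
-- what changed: A rebuilds and sums four list slices (via list.index and concatenation) for every common element, which is quadratic; B does one pass per array building a first-occurrence prefix-sum dict plus the total, then computes each crossing value in O(1) and keeps a running maximum.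
-- outside the precondition, e.g. on find_max_sum_path([1], [2]): A raises ValueError, B returns None
import Mathlib
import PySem

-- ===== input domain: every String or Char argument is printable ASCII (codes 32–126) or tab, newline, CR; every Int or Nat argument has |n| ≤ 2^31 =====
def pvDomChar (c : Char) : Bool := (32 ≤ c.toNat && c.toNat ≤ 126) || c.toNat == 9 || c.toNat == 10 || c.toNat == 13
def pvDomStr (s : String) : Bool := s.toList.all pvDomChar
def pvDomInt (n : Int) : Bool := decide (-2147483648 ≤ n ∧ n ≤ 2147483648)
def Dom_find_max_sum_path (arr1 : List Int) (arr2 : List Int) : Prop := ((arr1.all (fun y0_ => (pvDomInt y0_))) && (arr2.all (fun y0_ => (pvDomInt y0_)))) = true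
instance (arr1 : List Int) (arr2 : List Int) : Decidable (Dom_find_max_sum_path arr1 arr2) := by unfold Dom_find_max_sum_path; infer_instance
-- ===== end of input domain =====

-- B replaces A's per-common-element list slicing/summing (quadratic) by one first-occurrence
-- prefix-sum dict per array and an O(1) crossing value per common element (objective: faster).

-- ===== PORT A =====
-- Python iterates the common numbers in set (hash) order; the result is a max of Int values,
-- which is independent of that order, so the port iterates PySem.Set order.
def find_max_sum_path (arr1 : List Int) (arr2 : List Int) : Int :=
  let common_numbers : PySem.Set Int := PySem.Set.inter (PySem.Set.ofList arr1) (PySem.Set.ofList arr2)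
  let paths : List Int := common_numbers.foldl (fun paths num =>
    -- num ∈ arr1 and num ∈ arr2 by construction, so list.index cannot raise; .getD 0 is never the default
    let idx1 : Int := ((PySem.List.index? arr1 num).getD 0 : Nat)
    let idx2 : Int := ((PySem.List.index? arr2 num).getD 0 : Nat)
    paths ++ [max ((PySem.List.slice arr1 none (some idx1) ++ PySem.List.slice arr2 (some idx2) none).sum)
                  ((PySem.List.slice arr2 none (some idx2) ++ PySem.List.slice arr1 (some idx1) none).sum)]) []
  -- max(paths) raises ValueError on an empty list: excluded by Pre_ (arrays share an element)
  ((PySem.List.max? paths (fun v => v)).getD 0)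

-- ===== PORT B =====
-- helper first_prefix of Source B: dict value -> prefix sum before its first occurrence, plus the total
def pvFirstPrefix (arr : List Int) : PySem.Dict Int Int × Int :=
  arr.foldl (fun (acc : PySem.Dict Int Int × Int) x =>
    ((if acc.1.contains x then acc.1 else acc.1.insert x acc.2), acc.2 + x))
    (PySem.Dict.empty, 0)

def find_max_sum_path_alt (arr1 : List Int) (arr2 : List Int) : Int :=
  let p1t1 := pvFirstPrefix arr1
  let p2t2 := pvFirstPrefix arr2
  let best : Option Int := p1t1.1.items.foldl (fun best pr =>
    match p2t2.1.get? pr.1 with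
    | none => best
    | some s2 =>
      let v := max (pr.2 + (p2t2.2 - s2)) (s2 + (p1t1.2 - pr.2))
      match best with
      | none => some v
      | some b => if v > b then some v else best) none
  -- Python B returns None when there is no common element: excluded by Pre_
  best.getD 0

-- ===== PRECONDITION & SPEC =====
-- Pre_ excludes inputs with no common element: there A raises ValueError (max of an empty
-- sequence) and B returns None, which is not an int.
def Pre_find_max_sum_path (arr1 : List Int) (arr2 : List Int) : Prop :=
  (arr1.any (fun x => arr2.contains x)) = true
instance (arr1 : List Int) (arr2 : List Int) : Decidable (Pre_find_max_sum_path arr1 arr2) := by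
  unfold Pre_find_max_sum_path; infer_instance

def pvWitness_find_max_sum_path : List Int × List Int := ([1, 2], [3, 2])

def Spec_find_max_sum_path (arr1 : List Int) (arr2 : List Int) (out : Int) : Prop := out = find_max_sum_path_alt arr1 arr2
instance (arr1 : List Int) (arr2 : List Int) (out : Int) : Decidable (Spec_find_max_sum_path arr1 arr2 out) := by unfold Spec_find_max_sum_path; infer_instance

-- ===== CLAIM (what is proved, stated in full; the proofs are below) =====
def Claim_equal_find_max_sum_path : Prop := ∀ (arr1 : List Int) (arr2 : List Int), Dom_find_max_sum_path arr1 arr2 → Pre_find_max_sum_path arr1 arr2 → Spec_find_max_sum_path arr1 arr2 (find_max_sum_path arr1 arr2)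

-- ===== LEMMAS AND PROOFS =====

-- the common value both programs compute for a common element x
def pvVal (arr1 arr2 : List Int) (x : Int) : Int :=
  max ((arr1.take (arr1.idxOf x)).sum + (arr2.sum - (arr2.take (arr2.idxOf x)).sum))
      ((arr2.take (arr2.idxOf x)).sum + (arr1.sum - (arr1.take (arr1.idxOf x)).sum))

lemma pv_find?_beq (S : List Int) (x : Int) (h : x ∈ S) :
    S.find? (fun y => y == x) = some x := by
  induction S with
  | nil => simp at h
  | cons a S ih =>
    rw [List.find?_cons]
    by_cases hax : a = x
    · simp [hax]
    · have hbe : (a == x) = false := by simp [hax]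
      have hx : x ∈ S := (List.mem_cons.mp h).resolve_left (fun e => hax e.symm)
      simp [hbe, ih hx]

lemma pv_idxOf?_mem (l : List Int) (x : Int) (h : x ∈ l) :
    List.idxOf? x l = some (l.idxOf x) := by
  induction l with
  | nil => simp at h
  | cons a l ih =>
    rw [List.idxOf?_cons, List.idxOf_cons]
    by_cases hax : a = x
    · simp [hax]
    · have hbe : (a == x) = false := by simp [hax]
      have hx : x ∈ l := (List.mem_cons.mp h).resolve_left (fun e => hax e.symm)
      simp [hbe, ih hx]

-- PySem.Set.ofList of a snoc
lemma pv_ofList_snoc (l : List Int) (x : Int) :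
    PySem.Set.ofList (l ++ [x]) =
      if x ∈ l then PySem.Set.ofList l else PySem.Set.ofList l ++ [x] := by
  have h1 : PySem.Set.ofList (l ++ [x]) = PySem.Set.add (PySem.Set.ofList l) x := by
    unfold PySem.Set.ofList
    rw [List.foldl_append]
    rfl
  rw [h1]
  unfold PySem.Set.add
  have hc : (PySem.Set.ofList l).contains x = decide (x ∈ l) := by
    unfold PySem.Set.contains
    simp [PySem.Set.mem_ofList]
  rw [hc]
  by_cases h : x ∈ l <;> simp [h]

-- invariant of Source B's first_prefix loop
lemma pv_fp_aux (l pre : List Int) :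
    l.foldl (fun (acc : PySem.Dict Int Int × Int) x =>
        ((if acc.1.contains x then acc.1 else acc.1.insert x acc.2), acc.2 + x))
      (⟨(PySem.Set.ofList pre).map (fun x => (x, (pre.take (pre.idxOf x)).sum))⟩, pre.sum)
    = (⟨(PySem.Set.ofList (pre ++ l)).map
          (fun x => (x, ((pre ++ l).take ((pre ++ l).idxOf x)).sum))⟩, (pre ++ l).sum) := by
  induction l generalizing pre with
  | nil => simp
  | cons x l ih =>
    have hcont : (PySem.Dict.contains
        (⟨(PySem.Set.ofList pre).map (fun x => (x, (pre.take (pre.idxOf x)).sum))⟩ : PySem.Dict Int Int) x)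
        = decide (x ∈ pre) := by
      simp only [PySem.Dict.contains, List.any_map]
      by_cases h : x ∈ pre
      · simp only [h, decide_true, List.any_eq_true]
        exact ⟨x, (PySem.Set.mem_ofList pre x).mpr h, by simp⟩
      · simp only [h, decide_false, List.any_eq_false]
        intro a ha
        simp only [Function.comp, beq_iff_eq]
        intro hax
        exact absurd ((PySem.Set.mem_ofList pre a).mp ha) (hax ▸ h)
    have key : ∀ (y : Int), y ∈ pre →
        ((pre ++ [x]).take ((pre ++ [x]).idxOf y)).sum = (pre.take (pre.idxOf y)).sum := by
      intro y hy
      rw [List.idxOf_append, if_pos hy,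
        List.take_append_of_le_length (le_of_lt (List.idxOf_lt_length_iff.mpr hy))]
    rw [List.foldl_cons]
    by_cases h : x ∈ pre
    · have hpre : (⟨(PySem.Set.ofList pre).map (fun y => (y, (pre.take (pre.idxOf y)).sum))⟩ : PySem.Dict Int Int)
          = ⟨(PySem.Set.ofList (pre ++ [x])).map (fun y => (y, ((pre ++ [x]).take ((pre ++ [x]).idxOf y)).sum))⟩ := by
        rw [pv_ofList_snoc, if_pos h]
        congr 1
        apply List.map_congr_left
        intro a ha
        have : a ∈ pre := (PySem.Set.mem_ofList pre a).mp ha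
        rw [key a this]
      have := ih (pre ++ [x])
      simp only [hcont, h, decide_true, if_true]
      rw [hpre]
      have hsum : pre.sum + x = (pre ++ [x]).sum := by simp
      rw [hsum, this]
      simp
    · -- x is new: insert appends (x, pre.sum)
      have hins : (PySem.Dict.insert
            (⟨(PySem.Set.ofList pre).map (fun y => (y, (pre.take (pre.idxOf y)).sum))⟩ : PySem.Dict Int Int) x pre.sum)
          = ⟨(PySem.Set.ofList (pre ++ [x])).map (fun y => (y, ((pre ++ [x]).take ((pre ++ [x]).idxOf y)).sum))⟩ := by
        unfold PySem.Dict.insert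
        rw [hcont]
        simp only [h, decide_false, Bool.false_eq_true, if_false]
        rw [pv_ofList_snoc, if_neg h]
        congr 1
        rw [List.map_append]
        congr 1
        · apply List.map_congr_left
          intro a ha
          have : a ∈ pre := (PySem.Set.mem_ofList pre a).mp ha
          rw [key a this]
        · simp only [List.map_cons, List.map_nil]
          rw [List.idxOf_append, if_neg h]
          simp
      simp only [hcont, h, decide_false, Bool.false_eq_true, if_false]
      rw [hins]
      have hsum : pre.sum + x = (pre ++ [x]).sum := by simp
      rw [hsum]
      have := ih (pre ++ [x])
      rw [this]
      simp
    
lemma pv_fp (arr : List Int) :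
    pvFirstPrefix arr =
      (⟨(PySem.Set.ofList arr).map (fun x => (x, (arr.take (arr.idxOf x)).sum))⟩, arr.sum) := by
  have := pv_fp_aux arr []
  simpa [pvFirstPrefix, PySem.Dict.empty, PySem.Set.ofList] using this

-- lookup in the first-prefix dict
lemma pv_fp_get (arr : List Int) (x : Int) :
    PySem.Dict.get? (⟨(PySem.Set.ofList arr).map (fun y => (y, (arr.take (arr.idxOf y)).sum))⟩ : PySem.Dict Int Int) x
      = if x ∈ arr then some ((arr.take (arr.idxOf x)).sum) else none := by
  unfold PySem.Dict.get?
  rw [List.find?_map]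
  by_cases h : x ∈ arr
  · have hx : x ∈ PySem.Set.ofList arr := (PySem.Set.mem_ofList arr x).mpr h
    have : (PySem.Set.ofList arr).find? ((fun p => p.1 == x) ∘ (fun y => (y, (arr.take (arr.idxOf y)).sum)))
        = some x := by
      simpa [Function.comp] using pv_find?_beq (PySem.Set.ofList arr) x hx
    rw [this]
    simp [h]
  · have : (PySem.Set.ofList arr).find? ((fun p => p.1 == x) ∘ (fun y => (y, (arr.take (arr.idxOf y)).sum)))
        = none := by
      rw [List.find?_eq_none]
      intro a ha
      simp only [Function.comp, beq_iff_eq]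
      intro hax
      exact h (hax ▸ (PySem.Set.mem_ofList arr a).mp ha)
    rw [this]
    simp [h]

-- A's result is the max over common elements of pvVal
lemma pv_A (arr1 arr2 : List Int) :
    find_max_sum_path arr1 arr2 =
      (PySem.List.max? (((PySem.Set.ofList arr1).filter (fun x => decide (x ∈ arr2))).map
        (pvVal arr1 arr2)) (fun v => v)).getD 0 := by
  unfold find_max_sum_path
  dsimp only
  rw [PySem.List.foldl_append_singleton_eq_map
    (f := fun num => max ((PySem.List.slice arr1 none (some (((PySem.List.index? arr1 num).getD 0 : Nat) : Int)) ++ PySem.List.slice arr2 (some (((PySem.List.index? arr2 num).getD 0 : Nat) : Int)) none).sum)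
                         ((PySem.List.slice arr2 none (some (((PySem.List.index? arr2 num).getD 0 : Nat) : Int)) ++ PySem.List.slice arr1 (some (((PySem.List.index? arr1 num).getD 0 : Nat) : Int)) none).sum))]
  simp only [List.nil_append]
  have hfilter : PySem.Set.inter (PySem.Set.ofList arr1) (PySem.Set.ofList arr2)
      = (PySem.Set.ofList arr1).filter (fun x => decide (x ∈ arr2)) := by
    unfold PySem.Set.inter
    apply List.filter_congr
    intro a _
    simp [PySem.Set.contains, PySem.Set.mem_ofList]
  rw [hfilter]
  congr 1
  congr 1
  apply List.map_congr_left
  intro a ha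
  have ha1 : a ∈ arr1 := (PySem.Set.mem_ofList arr1 a).mp (List.mem_of_mem_filter ha)
  have ha2 : a ∈ arr2 := by simpa using List.of_mem_filter ha
  rw [PySem.List.index?_eq_idxOf?, PySem.List.index?_eq_idxOf?,
    pv_idxOf?_mem arr1 a ha1, pv_idxOf?_mem arr2 a ha2]
  simp only [Option.getD_some]
  rw [PySem.List.slice_to_natCast, PySem.List.slice_from_natCast,
    PySem.List.slice_to_natCast, PySem.List.slice_from_natCast]
  unfold pvVal
  have h1 := List.sum_take_add_sum_drop arr1 (arr1.idxOf a)
  have h2 := List.sum_take_add_sum_drop arr2 (arr2.idxOf a)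
  simp only [List.sum_append]
  omega

-- map of an if-filterMap is map over filter
lemma pv_filterMap_if (p : Int → Bool) (f : Int → Int) (l : List Int) :
    l.filterMap (fun x => if p x then some (f x) else none) = (l.filter p).map f := by
  induction l with
  | nil => simp
  | cons a l ih => by_cases h : p a <;> simp [h, ih]

-- B's result is the same max
lemma pv_B (arr1 arr2 : List Int) :
    find_max_sum_path_alt arr1 arr2 =
      (PySem.List.max? (((PySem.Set.ofList arr1).filter (fun x => decide (x ∈ arr2))).map
        (pvVal arr1 arr2)) (fun v => v)).getD 0 := by
  unfold find_max_sum_path_alt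
  dsimp only
  rw [pv_fp arr1, pv_fp arr2]
  congr 1
  rw [← pv_filterMap_if (fun x => decide (x ∈ arr2)) (pvVal arr1 arr2) (PySem.Set.ofList arr1)]
  unfold PySem.List.max?
  rw [List.foldl_filterMap, List.foldl_map]
  apply PySem.List.foldl_congr_mem
  intro best x hx
  have hx1 : x ∈ arr1 := (PySem.Set.mem_ofList arr1 x).mp hx
  rw [pv_fp_get arr2 x]
  by_cases h2 : x ∈ arr2
  · simp only [h2, if_true, decide_true]
    unfold pvVal
    cases best <;> rfl
  · simp only [h2, if_false, decide_false]
    cases best <;> rfl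

theorem pv_AB (arr1 arr2 : List Int) :
    find_max_sum_path arr1 arr2 = find_max_sum_path_alt arr1 arr2 := by
  rw [pv_A, pv_B]

-- ===== VERDICT (by name: the statement is the Claim_ definition above) =====
theorem find_max_sum_path_spec : Claim_equal_find_max_sum_path := by
  intro arr1 arr2 _ _
  unfold Spec_find_max_sum_path
  exact pv_AB arr1 arr2
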